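-- pv_equiv track=rewrite | github.com/JenZhen/LC | lc_ladder/company/gg/Rotate_Digits.py | ifGoodNum
-- ===== SOURCE A (Python) =====
-- def ifGoodNum(num):
--     strlist = list(str(num))
--     lenNum = len(strlist)
--     lenSysm = 0
--     lenAsysm = 0
--     for char in strlist:
--         if char in set(['0','1','8']):
--             lenSysm += 1
--         elif char in set(['2', '5', '6', '9']):
--             lenAsysm += 1
--         else:
--             return False
--     if lenSysm == lenNum:
--         return False
--     return True
-- ===== SOURCE B (Python) =====
-- def ifGoodNum(num):
--     digits = set(str(num))
--     if not digits <= {'0', '1', '8', '2', '5', '6', '9'}: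
--         return False
--     return bool(digits & {'2', '5', '6', '9'})
-- ===== Notes on version B (the rewrite author's own statement) =====
-- stated objective: simpler
-- what changed: Replaces the per-character counting loop with its three branches and early returns by two set-algebra tests on the deduplicated digit set: subset of the rotatable digits, and non-empty intersection with the asymmetric digits.
import Mathlib
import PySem

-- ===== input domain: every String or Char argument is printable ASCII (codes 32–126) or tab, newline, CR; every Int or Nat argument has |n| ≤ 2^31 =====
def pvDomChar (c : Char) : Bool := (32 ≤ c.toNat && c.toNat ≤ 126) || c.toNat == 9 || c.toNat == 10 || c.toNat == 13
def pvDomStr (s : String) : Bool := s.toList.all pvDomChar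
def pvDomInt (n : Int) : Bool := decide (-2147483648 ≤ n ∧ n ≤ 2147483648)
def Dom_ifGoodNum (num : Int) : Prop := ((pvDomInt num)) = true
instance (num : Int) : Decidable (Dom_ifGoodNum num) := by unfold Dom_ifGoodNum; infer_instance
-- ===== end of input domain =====

-- B replaces A's per-character counting loop with early returns by two set-algebra
-- tests on the deduplicated digit set (subset of rotatable digits, non-empty
-- intersection with asymmetric digits); objective: simpler.

-- ===== PORT A =====
-- the for-loop with its two counters and early 'return False'
def ifGoodNumLoop : List Char → Int → Int → Option (Int × Int)
  | [], lenSysm, lenAsysm => some (lenSysm, lenAsysm)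
  | c :: rest, lenSysm, lenAsysm =>
    if PySem.Set.contains (PySem.Set.ofList ['0','1','8']) c then
      ifGoodNumLoop rest (lenSysm + 1) lenAsysm
    else if PySem.Set.contains (PySem.Set.ofList ['2','5','6','9']) c then
      ifGoodNumLoop rest lenSysm (lenAsysm + 1)
    else
      none

def ifGoodNum (num : Int) : Bool :=
  let strlist := PySem.Int.toChars num
  let lenNum : Int := strlist.length
  match ifGoodNumLoop strlist 0 0 with
  | none => false
  | some (lenSysm, _lenAsysm) =>
    if lenSysm = lenNum then false else true

-- ===== PORT B =====
def ifGoodNum_alt (num : Int) : Bool :=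
  let digits : PySem.Set Char := PySem.Set.ofList (PySem.Int.toChars num)
  if !(PySem.Set.issubset digits (PySem.Set.ofList ['0','1','8','2','5','6','9'])) then
    false
  else
    !(PySem.Set.inter digits (PySem.Set.ofList ['2','5','6','9'])).isEmpty

-- ===== PRECONDITION & SPEC =====
def Spec_ifGoodNum (num : Int) (out : Bool) : Prop := out = ifGoodNum_alt num
instance (num : Int) (out : Bool) : Decidable (Spec_ifGoodNum num out) := by unfold Spec_ifGoodNum; infer_instance

-- ===== CLAIM (what is proved, stated in full; the proofs are below) =====
def Claim_equal_ifGoodNum : Prop := ∀ (num : Int), Dom_ifGoodNum num → Spec_ifGoodNum num (ifGoodNum num)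

-- ===== LEMMAS AND PROOFS =====
def symB (c : Char) : Bool := decide (c ∈ (['0','1','8'] : List Char))
def asymB (c : Char) : Bool := decide (c ∈ (['2','5','6','9'] : List Char))

lemma contains_sym (c : Char) : (PySem.Set.ofList ['0','1','8']).contains c = symB c := by
  have h : PySem.Set.ofList ['0','1','8'] = (['0','1','8'] : List Char) := by decide
  rw [h]; simp [symB]

lemma contains_asym (c : Char) : (PySem.Set.ofList ['2','5','6','9']).contains c = asymB c := by
  have h : PySem.Set.ofList ['2','5','6','9'] = (['2','5','6','9'] : List Char) := by decide
  rw [h]; simp [asymB]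

set_option maxHeartbeats 1000000 in
lemma contains_big (c : Char) :
    (PySem.Set.ofList ['0','1','8','2','5','6','9']).contains c = (symB c || asymB c) := by
  have h : PySem.Set.ofList ['0','1','8','2','5','6','9']
      = (['0','1','8','2','5','6','9'] : List Char) := by rfl
  rw [h, Bool.eq_iff_iff]
  simp [PySem.Set.contains, symB, asymB]
  tauto

lemma sym_asym_disjoint (c : Char) (h : symB c = true) : asymB c = false := by
  simp only [symB, List.mem_cons, List.not_mem_nil, or_false, decide_eq_true_eq] at h
  rcases h with rfl | rfl | rfl <;> decide

lemma loop_eq (cs : List Char) (s a : Int) :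
    ifGoodNumLoop cs s a =
      if cs.all (fun c => symB c || asymB c)
      then some (s + (cs.countP symB : Int), a + (cs.countP asymB : Int))
      else none := by
  induction cs generalizing s a with
  | nil => simp [ifGoodNumLoop]
  | cons c rest ih =>
    rw [ifGoodNumLoop, contains_sym, contains_asym]
    cases hs : symB c with
    | true =>
      have ha := sym_asym_disjoint c hs
      simp only [hs, ha, ih, List.all_cons, List.countP_cons, if_true, Bool.true_or,
        Bool.true_and]
      by_cases hrest : (rest.all fun c => symB c || asymB c) = true
      · simp only [hrest, if_true, Option.some.injEq, Prod.mk.injEq]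
        constructor <;> push_cast <;> ring
      · simp [hrest]
    | false =>
      cases ha : asymB c with
      | true =>
        simp only [hs, ha, ih, List.all_cons, List.countP_cons, Bool.false_or, Bool.true_and,
          if_true, Bool.false_eq_true, if_false]
        by_cases hrest : (rest.all fun c => symB c || asymB c) = true
        · simp only [hrest, if_true, Option.some.injEq, Prod.mk.injEq]
          constructor <;> push_cast <;> ring
        · simp [hrest]
      | false =>
        simp [hs, ha, List.all_cons]

lemma all_ofList (p : Char → Bool) (cs : List Char) :
    (PySem.Set.ofList cs).all p = cs.all p := by
  rw [Bool.eq_iff_iff]; simp only [List.all_eq_true, PySem.Set.mem_ofList]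

lemma any_ofList_filter (p : Char → Bool) (cs : List Char) :
    (!((PySem.Set.ofList cs).filter p).isEmpty) = cs.any p := by
  rw [Bool.eq_iff_iff]
  simp only [Bool.not_eq_eq_eq_not, Bool.not_true, List.isEmpty_eq_false_iff_exists_mem,
    List.mem_filter, List.any_eq_true, PySem.Set.mem_ofList]

theorem ifGoodNum_spec : Claim_equal_ifGoodNum := by
  intro num _
  unfold Spec_ifGoodNum ifGoodNum ifGoodNum_alt
  simp only [loop_eq, PySem.Set.issubset, PySem.Set.inter]
  set cs := PySem.Int.toChars num with hcs
  simp only [contains_big, contains_asym, all_ofList, any_ofList_filter]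
  by_cases hall : (cs.all fun c => symB c || asymB c) = true
  · simp only [hall, if_true, Bool.not_true, Bool.false_eq_true, if_false]
    by_cases hany : cs.any asymB = true
    · have hne : cs.countP symB ≠ cs.length := fun h => by
        rcases List.any_eq_true.mp hany with ⟨c, hc, hac⟩
        have hsym := (List.countP_eq_length.mp h) c hc
        simp [sym_asym_disjoint c hsym] at hac
      rw [if_neg (by omega : ¬((0 : Int) + (cs.countP symB : Int) = (cs.length : Int)))]
      exact hany.symm
    · have hallsym : ∀ c ∈ cs, symB c = true := by
        intro c hc
        have hv := List.all_eq_true.mp hall c hc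
        rcases Bool.or_eq_true_iff.mp hv with h | h
        · exact h
        · exact absurd (List.any_eq_true.mpr ⟨c, hc, h⟩) hany
      have hlen : cs.countP symB = cs.length := List.countP_eq_length.mpr hallsym
      rw [if_pos (by omega : ((0 : Int) + (cs.countP symB : Int) = (cs.length : Int)))]
      exact (Bool.not_eq_true _ |>.mp hany).symm
  · simp [hall]
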